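-- pv_equiv track=rewrite | github.com/moppius/advent-of-code | 2020/day_06/day_06.py | _sum_group_part_2
-- ===== SOURCE A (Python) =====
-- def _sum_group_part_2(response):
--     result = 0
--     lines = response.strip().split('\n')
--     num_guests = len(lines)
--     done_chars = []
--     stripped_response = "".join(response.split())
--     for char in stripped_response:
--         if char not in done_chars and response.count(char) == num_guests:
--             result += 1
--             done_chars.append(char)
--     return result
-- ===== SOURCE B (Python) =====
-- def _sum_group_part_2(response):
--     num_guests = len(response.strip().split('\n'))
--     counts = {}
--     for char in "".join(response.split()):
--         counts[char] = counts.get(char, 0) + 1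
--     return sum(1 for v in counts.values() if v == num_guests)
-- ===== Notes on version B (the rewrite author's own statement) =====
-- stated objective: faster
-- what changed: Replaces A's per-character done-list membership test plus repeated response.count scans (quadratic) with a single counting pass into a dict followed by one scan of its values.
import Mathlib
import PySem

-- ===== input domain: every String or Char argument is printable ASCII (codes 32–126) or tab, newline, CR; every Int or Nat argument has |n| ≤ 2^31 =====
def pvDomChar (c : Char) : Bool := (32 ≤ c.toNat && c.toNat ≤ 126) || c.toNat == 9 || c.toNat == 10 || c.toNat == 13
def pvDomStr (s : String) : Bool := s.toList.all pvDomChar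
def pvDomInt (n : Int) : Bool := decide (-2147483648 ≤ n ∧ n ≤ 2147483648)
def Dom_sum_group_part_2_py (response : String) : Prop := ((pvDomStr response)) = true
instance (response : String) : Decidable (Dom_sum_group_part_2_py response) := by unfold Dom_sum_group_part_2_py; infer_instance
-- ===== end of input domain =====

-- B replaces A's per-character repeated response.count scans by a single counting
-- pass into a dict followed by one scan of its values (faster; same return value).

-- ===== PORT A =====
def sum_group_part_2_py (response : String) : Int :=
  let lines := PySem.Chars.splitOn (PySem.Chars.strip response.toList) ['\n']
  let num_guests : Int := (lines.length : Int)
  let stripped := PySem.Str.join "" (PySem.Str.split₀ response)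
  (stripped.toList.foldl
    (fun (st : Int × List Char) ch =>
      if (!st.2.contains ch) && ((PySem.Str.count response (String.ofList [ch]) : Int) == num_guests)
      then (st.1 + 1, st.2 ++ [ch]) else st)
    (0, [])).1

-- ===== PORT B =====
def sum_group_part_2_py_alt (response : String) : Int :=
  let num_guests : Int :=
    ((PySem.Chars.splitOn (PySem.Chars.strip response.toList) ['\n']).length : Int)
  let counts := (PySem.Str.join "" (PySem.Str.split₀ response)).toList.foldl
      (fun (d : PySem.Dict Char Int) ch => d.insert ch (d.getD ch 0 + 1)) PySem.Dict.empty
  counts.values.foldl (fun acc v => if v == num_guests then acc + 1 else acc) 0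

-- ===== PRECONDITION & SPEC =====
def Spec_sum_group_part_2_py (response : String) (out : Int) : Prop := out = sum_group_part_2_py_alt response
instance (response : String) (out : Int) : Decidable (Spec_sum_group_part_2_py response out) := by unfold Spec_sum_group_part_2_py; infer_instance

-- ===== CLAIM (what is proved, stated in full; the proofs are below) =====
def Claim_equal_sum_group_part_2_py : Prop := ∀ (response : String), Dom_sum_group_part_2_py response → Spec_sum_group_part_2_py response (sum_group_part_2_py response)

-- ===== LEMMAS AND PROOFS =====

-- flatten ∘ intersperse [] = flatten (helper for pv_join_split₀)
theorem pv_flatten_intersperse_nil {α : Type} (L : List (List α)) :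
    (L.intersperse ([] : List α)).flatten = L.flatten := by
  induction L with
  | nil => rfl
  | cons x L ih =>
      cases L with
      | nil => rfl
      | cons y M => simpa [List.intersperse] using ih

-- ''.join(s.split()) is exactly s with its whitespace characters removed.
theorem pv_split₀_go_flatten (s : List Char) : ∀ (cur : List Char) (acc : List (List Char)),
    (PySem.Chars.split₀.go s cur acc).flatten
      = acc.reverse.flatten ++ cur.reverse ++ s.filter (fun c => !PySem.Chars.isspace c) := by
  induction s with
  | nil =>
      intro cur acc
      rw [PySem.Chars.split₀.go.eq_def]
      cases cur <;> simp
  | cons c rest ih =>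
      intro cur acc
      rw [PySem.Chars.split₀.go.eq_def]
      by_cases hs : PySem.Chars.isspace c = true
      · cases cur <;> simp [hs, ih]
      · simp [hs, ih]

theorem pv_join_split₀ (s : List Char) :
    PySem.Chars.join [] (PySem.Chars.split₀ s) = s.filter (fun c => !PySem.Chars.isspace c) := by
  have h := pv_split₀_go_flatten s [] []
  rw [PySem.Chars.join, List.intercalate, pv_flatten_intersperse_nil, PySem.Chars.split₀]
  simpa using h

-- s.count(c) for a single character c is the character count
theorem pv_count_go_singleton (c : Char) : ∀ (fuel : Nat) (l : List Char) (acc : Nat),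
    l.length ≤ fuel → PySem.Chars.count.go [c] fuel l acc = acc + l.count c := by
  intro fuel
  induction fuel with
  | zero =>
      intro l acc h
      cases l with
      | nil => rw [PySem.Chars.count.go.eq_def]; simp
      | cons x t => simp at h
  | succ n ih =>
      intro l acc h
      rw [PySem.Chars.count.go.eq_def]
      cases l with
      | nil => simp
      | cons x t =>
          simp only [List.isPrefixOf, Bool.and_true, List.length_cons] at *
          by_cases hx : c == x
          · simp [hx, ih t (acc + 1) (by omega), (LawfulBEq.eq_of_beq hx).symm]
            omega
          · have hx' : (x == c) = false := by
              cases h2 : x == c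
              · rfl
              · exact absurd (by simpa [LawfulBEq.eq_of_beq h2] ) (by simp [hx] : ¬ (c == x) = true)
            simp [hx, ih t acc (by omega), List.count_cons, hx']

theorem pv_count_singleton (l : List Char) (c : Char) :
    PySem.Chars.count l [c] = l.count c := by
  simpa using pv_count_go_singleton c l.length l 0 le_rfl

-- A's loop, processed from the left: the accumulated done-list is the filtered
-- first-occurrence list of the seen prefix, the counter its length.
theorem pv_loopA (P : Char → Bool) (l : List Char) : ∀ (p : List Char) (r : Int),
    (l.foldl
      (fun (st : Int × List Char) ch =>
        if (!st.2.contains ch) && P ch then (st.1 + 1, st.2 ++ [ch]) else st)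
      (r, (PySem.Set.ofList p).filter P))
    = (r + ((((PySem.Set.ofList (p ++ l)).filter P).length : Int)
            - (((PySem.Set.ofList p).filter P).length : Int)),
       (PySem.Set.ofList (p ++ l)).filter P) := by
  induction l with
  | nil => intro p r; simp
  | cons c t ih =>
      intro p r
      have hPA : p ++ c :: t = (p ++ [c]) ++ t := by simp
      by_cases hP : P c = true
      · by_cases hmem : c ∈ PySem.Set.ofList p
        · have hcond : (!((PySem.Set.ofList p).filter P).contains c && P c) = false := by
            simp [List.elem_eq_contains.symm, List.mem_filter, hmem, hP]
          have hadd : PySem.Set.ofList (p ++ [c]) = PySem.Set.ofList p := by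
            rw [PySem.Set.ofList_append_singleton, PySem.Set.add]
            simp [PySem.Set.contains, List.elem_eq_contains.symm, hmem]
          simp only [List.foldl_cons, hcond, Bool.false_eq_true, if_false]
          rw [hPA, ← hadd]
          exact ih (p ++ [c]) r
        · have hcond : (!((PySem.Set.ofList p).filter P).contains c && P c) = true := by
            simp [List.elem_eq_contains.symm, List.mem_filter, hmem, hP]
          have hadd : PySem.Set.ofList (p ++ [c]) = PySem.Set.ofList p ++ [c] := by
            rw [PySem.Set.ofList_append_singleton, PySem.Set.add]
            simp [PySem.Set.contains, List.elem_eq_contains.symm, hmem]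
          have hfilt : (PySem.Set.ofList (p ++ [c])).filter P
              = (PySem.Set.ofList p).filter P ++ [c] := by
            simp [hadd, List.filter_append, hP]
          simp only [List.foldl_cons, hcond, if_true]
          rw [hPA, ← hfilt, ih (p ++ [c]) (r + 1), hfilt]
          refine Prod.ext ?_ rfl
          simp only [List.length_append, List.length_cons, List.length_nil]
          push_cast
          ring
      · have hP' : P c = false := by simpa using hP
        have hcond : (!((PySem.Set.ofList p).filter P).contains c && P c) = false := by
          simp [hP']
        have hfilt : (PySem.Set.ofList (p ++ [c])).filter P
            = (PySem.Set.ofList p).filter P := by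
          rw [PySem.Set.ofList_append_singleton, PySem.Set.add]
          by_cases hcp : c ∈ p
          · simp [hcp]
          · simp [hcp, List.filter_append, hP']
        simp only [List.foldl_cons, hcond, Bool.false_eq_true, if_false]
        rw [hPA, ← hfilt]
        exact ih (p ++ [c]) r

-- ===== VERDICT (by name: the statement is the Claim_ definition above) =====
theorem sum_group_part_2_py_spec : Claim_equal_sum_group_part_2_py := by
  intro response _
  unfold Spec_sum_group_part_2_py sum_group_part_2_py sum_group_part_2_py_alt
  dsimp only
  set R := response.toList with hR
  set n : Int := ((PySem.Chars.splitOn (PySem.Chars.strip R) ['\n']).length : Int) with hn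
  have hstr : (PySem.Str.join "" (PySem.Str.split₀ response)).toList
      = R.filter (fun c => !PySem.Chars.isspace c) := by
    rw [PySem.Str.toList_join, PySem.Str.split₀_map_toList]
    have he : ("" : String).toList = ([] : List Char) := rfl
    rw [he, pv_join_split₀]
  set s := R.filter (fun c => !PySem.Chars.isspace c) with hs
  rw [hstr]
  rw [PySem.Dict.foldl_insert_getD_add_one_eq_counter]
  have hvals : (PySem.Dict.counter s).values
      = (PySem.Set.ofList s).map (fun k => ((s.count k : Nat) : Int)) := by
    simp [PySem.Dict.values, PySem.Dict.items_counter, List.map_map, Function.comp]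
  rw [hvals, PySem.List.foldl_if_add_one]
  have hA := pv_loopA (fun ch => ((PySem.Str.count response (String.ofList [ch]) : Int) == n)) s [] 0
  simp only [List.nil_append, PySem.Set.ofList_nil, List.filter_nil] at hA
  rw [hA]
  rw [List.countP_map]
  have hcong : ∀ x ∈ PySem.Set.ofList s,
      (((fun v => v == n) ∘ fun k => ((s.count k : Nat) : Int)) x = true
        ↔ ((PySem.Str.count response (String.ofList [x]) : Int) == n) = true) := by
    intro x hx
    have hxs : x ∈ s := (PySem.Set.mem_ofList s x).mp hx
    have hns : (!PySem.Chars.isspace x) = true := (List.mem_filter.mp hxs).2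
    have h1 : PySem.Str.count response (String.ofList [x]) = R.count x := by
      have hml : (String.ofList [x]).toList = [x] := by simp
      rw [PySem.Str.count_eq, hml, ← hR, pv_count_singleton]
    have h2 : s.count x = R.count x := List.count_filter hns
    simp only [Function.comp, h1, h2]
  rw [List.countP_congr hcong]
  simp [List.countP_eq_length_filter]
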